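-- pv_equiv track=rewrite | github.com/pypi-data/pypi-mirror-377 | packages/ctao-bdms-rucio-policy/ctao_bdms_rucio_policy-0.2.0.tar.gz/ctao_bdms_rucio_policy-0.2.0/src/bdms_rucio_policy/algorithms.py | extract_scope_bdms
-- ===== SOURCE A (Python) =====
-- from collections.abc import Sequence
-- from typing import Optional
--
-- def extract_scope_bdms(did: str, scopes: Optional[Sequence[str]]) -> Sequence[str]:
--     """Scope extraction algorithm for CTAO.
--
--     Assumes LFNs of the form ``/<VO Name>/<scope>/<path>``.
--     """
--     msg = f"DID {did!r} does not match expected schema: /<VO Name>/<scope>/<path>."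
--     if not did.startswith("/"):
--         raise ValueError(msg)
--
--     components = [comp for comp in did.split("/") if comp != ""]
--
--     # if no "scope" is in the did, e.g. it's just the vo or another path
--     # we return the special "root" scope. Needed as the DIRAC integration
--     # needs a container to exist with DID /<VO> and that should belong to
--     # the scope "root" owned by the admin user.
--     if len(components) < 2:
--         return "root", did
--
--     return components[1], did
-- ===== SOURCE B (Python) =====
-- def extract_scope_bdms(did, scopes):
--     """Scope extraction via a single index scan; no component list is built."""
--     msg = f"DID {did!r} does not match expected schema: /<VO Name>/<scope>/<path>."
--     if not did.startswith("/"):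
--         raise ValueError(msg)
--     n = len(did)
--     i = 0
--     while i < n and did[i] == "/":   # leading slashes
--         i += 1
--     while i < n and did[i] != "/":   # first component (VO name)
--         i += 1
--     while i < n and did[i] == "/":   # slashes before the scope
--         i += 1
--     j = i
--     while j < n and did[j] != "/":   # the scope component
--         j += 1
--     scope = did[i:j]
--     if scope:
--         return scope, did
--     return "root", did
-- ===== Notes on version B (the rewrite author's own statement) =====
-- stated objective: simpler
-- what changed: Replaces split('/') + list-comprehension filter + indexing with a single four-phase forward index scan that slices the second non-empty component directly, building no intermediate list.
import Mathlib
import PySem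

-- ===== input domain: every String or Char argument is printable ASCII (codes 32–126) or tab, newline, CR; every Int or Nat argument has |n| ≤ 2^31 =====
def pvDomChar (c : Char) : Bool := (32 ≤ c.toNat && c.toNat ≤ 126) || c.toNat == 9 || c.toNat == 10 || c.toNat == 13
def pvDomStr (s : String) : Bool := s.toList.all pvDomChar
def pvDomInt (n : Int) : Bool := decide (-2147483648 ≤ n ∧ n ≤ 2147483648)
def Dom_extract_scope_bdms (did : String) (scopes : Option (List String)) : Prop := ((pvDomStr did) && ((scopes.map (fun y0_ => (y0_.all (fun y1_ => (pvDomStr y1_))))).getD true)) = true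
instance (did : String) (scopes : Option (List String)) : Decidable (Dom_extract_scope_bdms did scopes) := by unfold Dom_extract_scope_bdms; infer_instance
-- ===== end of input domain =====

-- B replaces the split/filter/index pipeline by a single four-phase index scan that
-- extracts the second non-empty '/'-separated component directly (objective: simpler).
-- A raises ValueError when did does not start with '/': those inputs are outside Pre_.

-- ===== PORT A =====
def extract_scope_bdms (did : String) (scopes : Option (List String)) : String × String :=
  -- msg = f"..." : pure string, no effect on the result
  if PySem.Str.startswith did "/" = false then ("", did)  -- raise ValueError(msg); excluded by Pre_
  else
    -- components = [comp for comp in did.split("/") if comp != ""]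
    let components := ((PySem.Str.split? did "/").getD []).filter (fun c => c ≠ "")  -- sep "/" ≠ "" so split? is always some
    if components.length < 2 then ("root", did)
    else ((PySem.List.pyGet? components 1).getD "", did)  -- components[1]; in range since length ≥ 2

-- ===== PORT B =====
-- Source B's index loops walk forward through the string; ported as structural recursion on
-- the corresponding suffix of did.toList (position i ↔ suffix from i), exact step for step.
def pvSkipEq : List Char → List Char
  | [] => []
  | c :: r => if c = '/' then pvSkipEq r else c :: r

def pvSkipNe : List Char → List Char
  | [] => []
  | c :: r => if c = '/' then c :: r else pvSkipNe r

def pvTakeNe : List Char → List Char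
  | [] => []
  | c :: r => if c = '/' then [] else c :: pvTakeNe r

def extract_scope_bdms_alt (did : String) (scopes : Option (List String)) : String × String :=
  if PySem.Str.startswith did "/" = false then ("", did)  -- raise ValueError(msg); excluded by Pre_
  else
    let cs := did.toList
    let afterLead := pvSkipEq cs                -- skip leading slashes
    let afterVO := pvSkipNe afterLead           -- skip the first component
    let atScope := pvSkipEq afterVO             -- skip slashes before the scope
    let scope := pvTakeNe atScope               -- did[i:j], the scope component
    if scope = [] then ("root", did) else (String.ofList scope, did)

-- ===== PRECONDITION & SPEC =====
-- A raises ValueError exactly when did does not start with "/"; only those inputs are excluded.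
def Pre_extract_scope_bdms (did : String) (scopes : Option (List String)) : Prop :=
  PySem.Str.startswith did "/" = true
instance (did : String) (scopes : Option (List String)) : Decidable (Pre_extract_scope_bdms did scopes) := by unfold Pre_extract_scope_bdms; infer_instance

def pvWitness_extract_scope_bdms : String × Option (List String) := ("/cta/user/path", none)

def Spec_extract_scope_bdms (did : String) (scopes : Option (List String)) (out : String × String) : Prop := out = extract_scope_bdms_alt did scopes
instance (did : String) (scopes : Option (List String)) (out : String × String) : Decidable (Spec_extract_scope_bdms did scopes out) := by unfold Spec_extract_scope_bdms; infer_instance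

-- ===== CLAIM (what is proved, stated in full; the proofs are below) =====
def Claim_equal_extract_scope_bdms : Prop := ∀ (did : String) (scopes : Option (List String)), Dom_extract_scope_bdms did scopes → Pre_extract_scope_bdms did scopes → Spec_extract_scope_bdms did scopes (extract_scope_bdms did scopes)

-- ===== LEMMAS AND PROOFS =====

-- splitSlash: functional characterisation of Python's did.split("/") (sep = single '/')
def pvConsHead (p : List Char) : List (List Char) → List (List Char)
  | [] => [p]
  | q :: qs => (p ++ q) :: qs

def pvSplitSlash : List Char → List (List Char)
  | [] => [[]]
  | c :: r => if c = '/' then [] :: pvSplitSlash r else pvConsHead [c] (pvSplitSlash r)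

theorem pvSplitSlash_ne_nil (l : List Char) : pvSplitSlash l ≠ [] := by
  cases l with
  | nil => simp [pvSplitSlash]
  | cons c r =>
    simp only [pvSplitSlash]
    split
    · simp
    · cases h : pvSplitSlash r with
      | nil => simp [pvConsHead]
      | cons q qs => simp [pvConsHead]

theorem pvConsHead_nil (m : List (List Char)) (h : m ≠ []) : pvConsHead [] m = m := by
  cases m with
  | nil => exact absurd rfl h
  | cons q qs => simp [pvConsHead]

theorem pvConsHead_consHead (a b : List Char) (m : List (List Char)) :
    pvConsHead a (pvConsHead b m) = pvConsHead (a ++ b) m := by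
  cases m <;> simp [pvConsHead]

theorem pv_go_eq (fuel : Nat) (l cur : List Char) (acc : List (List Char)) (h : l.length ≤ fuel) :
    PySem.Chars.splitOn.go ['/'] fuel l cur acc = acc.reverse ++ pvConsHead cur.reverse (pvSplitSlash l) := by
  induction fuel generalizing l cur acc with
  | zero =>
    have : l = [] := List.eq_nil_of_length_eq_zero (Nat.le_zero.mp h)
    subst this
    simp [PySem.Chars.splitOn.go, pvSplitSlash, pvConsHead]
  | succ n ih =>
    cases l with
    | nil => simp [PySem.Chars.splitOn.go, pvSplitSlash, pvConsHead]
    | cons c rest =>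
      by_cases hc : c = '/'
      · subst hc
        rw [show PySem.Chars.splitOn.go ['/'] (n+1) ('/' :: rest) cur acc
              = PySem.Chars.splitOn.go ['/'] n rest [] (cur.reverse :: acc) by
            simp [PySem.Chars.splitOn.go, List.isPrefixOf]]
        rw [ih rest [] (cur.reverse :: acc) (by simpa using Nat.lt_succ_iff.mp (by simpa using h))]
        simp only [List.reverse_nil, pvConsHead_nil _ (pvSplitSlash_ne_nil rest)]
        simp [pvSplitSlash, pvConsHead]
      · rw [show PySem.Chars.splitOn.go ['/'] (n+1) (c :: rest) cur acc
              = PySem.Chars.splitOn.go ['/'] n rest (c :: cur) acc by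
            simp [PySem.Chars.splitOn.go, List.isPrefixOf]
            exact fun h' => absurd h'.symm hc]
        rw [ih rest (c :: cur) acc (by simpa using Nat.lt_succ_iff.mp (by simpa using h))]
        simp [pvSplitSlash, hc, pvConsHead_consHead]

theorem pvSplitOn_eq (l : List Char) : PySem.Chars.splitOn l ['/'] = pvSplitSlash l := by
  unfold PySem.Chars.splitOn
  rw [pv_go_eq (l.length + 1) l [] [] (Nat.le_succ _)]
  simp only [List.reverse_nil, List.nil_append, pvConsHead_nil _ (pvSplitSlash_ne_nil l)]

theorem pvSkipNe_length_le (l : List Char) : (pvSkipNe l).length ≤ l.length := by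
  induction l with
  | nil => simp [pvSkipNe]
  | cons c r ih =>
    simp only [pvSkipNe]
    split
    · simp
    · exact Nat.le_succ_of_le ih

-- the non-empty components of pvSplitSlash, computed by direct scanning
def pvComps : List Char → List (List Char)
  | [] => []
  | c :: r => if c = '/' then pvComps r else pvTakeNe (c :: r) :: pvComps (pvSkipNe r)
termination_by l => l.length
decreasing_by
  · simp
  · simpa using Nat.lt_succ_of_le (pvSkipNe_length_le r)

theorem pvSkipNe_head (l : List Char) (c : Char) (r : List Char) (h : pvSkipNe l = c :: r) : c = '/' := by
  induction l with
  | nil => simp [pvSkipNe] at h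
  | cons a s ih =>
    simp only [pvSkipNe] at h
    split at h
    · cases h; assumption
    · exact ih h

theorem pvSkipEq_head (l : List Char) (c : Char) (r : List Char) (h : pvSkipEq l = c :: r) : c ≠ '/' := by
  induction l with
  | nil => simp [pvSkipEq] at h
  | cons a s ih =>
    simp only [pvSkipEq] at h
    split at h
    · exact ih h
    · cases h; assumption

theorem pvSplitSlash_destruct (l : List Char) :
    pvSplitSlash l = pvTakeNe l :: (match pvSkipNe l with | [] => [] | _ :: r => pvSplitSlash r) := by
  induction l with
  | nil => simp [pvSplitSlash, pvTakeNe, pvSkipNe]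
  | cons c r ih =>
    by_cases hc : c = '/'
    · subst hc; simp [pvSplitSlash, pvTakeNe, pvSkipNe]
    · simp only [pvSplitSlash, pvTakeNe, pvSkipNe, if_neg hc]
      rw [ih]
      simp [pvConsHead]

theorem pv_filter_splitSlash_aux (n : Nat) :
    ∀ l : List Char, l.length ≤ n → (pvSplitSlash l).filter (fun p => p ≠ []) = pvComps l := by
  induction n with
  | zero =>
    intro l h
    have : l = [] := List.eq_nil_of_length_eq_zero (Nat.le_zero.mp h)
    subst this
    simp [pvSplitSlash, pvComps]
  | succ n ih =>
    intro l h
    cases l with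
    | nil => simp [pvSplitSlash, pvComps]
    | cons c r =>
      by_cases hc : c = '/'
      · subst hc
        rw [show pvSplitSlash ('/' :: r) = [] :: pvSplitSlash r from by simp [pvSplitSlash]]
        rw [show pvComps ('/' :: r) = pvComps r from by rw [pvComps]; simp]
        rw [List.filter_cons]
        simpa using ih r (by simpa using Nat.lt_succ_iff.mp (by simpa using h))
      · rw [pvSplitSlash_destruct]
        have htk : pvTakeNe (c :: r) = c :: pvTakeNe r := by simp [pvTakeNe, hc]
        rw [List.filter_cons]
        have hne : (pvTakeNe (c :: r) ≠ []) := by rw [htk]; simp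
        rw [if_pos (show ((fun p => decide (p ≠ [])) (pvTakeNe (c :: r)) = true) from by simpa using hne)]
        have hcomps : pvComps (c :: r) = pvTakeNe (c :: r) :: pvComps (pvSkipNe r) := by
          rw [pvComps]; simp [hc]
        rw [hcomps]
        congr 1
        rw [show pvSkipNe (c :: r) = pvSkipNe r from by simp [pvSkipNe, hc]]
        cases hs : pvSkipNe r with
        | nil => simp [pvComps]
        | cons d s =>
          have hd : d = '/' := pvSkipNe_head r d s hs
          subst hd
          have hlen : s.length ≤ n := by
            have h1 : (pvSkipNe r).length ≤ r.length := pvSkipNe_length_le r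
            rw [hs] at h1
            simp only [List.length_cons] at h1 ⊢
            have h2 : r.length ≤ n := by simpa using Nat.lt_succ_iff.mp (by simpa using h)
            omega
          rw [show pvComps ('/' :: s) = pvComps s by rw [pvComps]; simp]
          exact ih s hlen

theorem pv_filter_splitSlash (l : List Char) :
    (pvSplitSlash l).filter (fun p => p ≠ []) = pvComps l :=
  pv_filter_splitSlash_aux l.length l (Nat.le_refl _)

theorem pvComps_eq (l : List Char) :
    pvComps l = if pvSkipEq l = [] then [] else pvTakeNe (pvSkipEq l) :: pvComps (pvSkipNe (pvSkipEq l)) := by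
  induction l with
  | nil => simp [pvComps, pvSkipEq]
  | cons c r ih =>
    by_cases hc : c = '/'
    · subst hc
      rw [show pvComps ('/' :: r) = pvComps r by rw [pvComps]; simp]
      rw [ih]
      simp [pvSkipEq]
    · rw [show pvComps (c :: r) = pvTakeNe (c :: r) :: pvComps (pvSkipNe r) by rw [pvComps]; simp [hc]]
      simp [pvSkipEq, hc, pvSkipNe]

theorem pv_ofList_ne_empty (p : List Char) : (String.ofList p ≠ "") ↔ (p ≠ []) := by
  constructor
  · intro h hp; exact h (by simp [hp])
  · intro h he
    have : (String.ofList p).toList = ("" : String).toList := by rw [he]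
    simp at this
    exact h this

theorem pv_components_eq (did : String) :
    ((PySem.Str.split? did "/").getD []).filter (fun c => c ≠ "")
      = (pvComps did.toList).map String.ofList := by
  rw [show PySem.Str.split? did "/" = some ((PySem.Chars.splitOn did.toList ['/']).map String.ofList) by
    simp [PySem.Str.split?, PySem.Chars.split?]]
  simp only [Option.getD_some]
  rw [pvSplitOn_eq, List.filter_map]
  rw [show ((fun c => decide (c ≠ "")) ∘ String.ofList) = (fun p => decide (p ≠ [])) by
    funext p
    exact decide_eq_decide.mpr (pv_ofList_ne_empty p)]
  rw [pv_filter_splitSlash]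

-- ===== VERDICT (by name: the statement is the Claim_ definition above) =====
theorem extract_scope_bdms_spec : Claim_equal_extract_scope_bdms := by
  intro did scopes _ hpre
  unfold Spec_extract_scope_bdms extract_scope_bdms extract_scope_bdms_alt
  rw [Pre_extract_scope_bdms] at hpre
  rw [hpre]
  simp only [Bool.true_eq_false, if_false]
  rw [pv_components_eq]
  generalize did.toList = L
  have hA := pvComps_eq L
  cases h1 : pvSkipEq L with
  | nil =>
    simp only [h1] at hA
    rw [hA]
    simp [pvSkipNe, pvSkipEq, pvTakeNe]
  | cons c r =>
    simp only [h1] at hA ⊢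
    simp only [reduceCtorEq, if_false] at hA
    have hB := pvComps_eq (pvSkipNe (c :: r))
    cases h2 : pvSkipEq (pvSkipNe (c :: r)) with
    | nil =>
      simp only [h2] at hB
      rw [hB] at hA
      rw [hA]
      simp [pvTakeNe]
    | cons d s =>
      simp only [h2, if_neg (List.cons_ne_nil d s)] at hB
      rw [hB] at hA
      rw [hA]
      have hd : d ≠ '/' := pvSkipEq_head _ d s h2
      have htk : pvTakeNe (d :: s) = d :: pvTakeNe s := by simp [pvTakeNe, hd]
      rw [htk]
      simp [PySem.List.pyGet?, PySem.List.pyIdx?]
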